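-- pv_equiv track=rewrite | github.com/pypi-data/pypi-mirror-87 | packages/Swift-CCF-Kravchuk/Swift_CCF_Kravchuk-0.0.1-py3-none-any.whl/util/util.py | get_next_word_indices
-- ===== SOURCE A (Python) =====
-- SEPARATORS = [" ", "\n", "\r", "{", "}", "=", ">",
--               "<", ":", "?", ",", "\"", "\'", "(", ")"]
--
-- def get_next_word_indices(data):
--     """Get indices between separators,
--     skipping separators at start"""
--
--     start = None
--
--     for i in range(0, len(data)):
--         if start == None and data[i] not in SEPARATORS:
--             start = i
--
--         if start != None and data[i] in SEPARATORS:
--             return start, i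
--
--     return (None, None)  # file read until EOF
-- ===== SOURCE B (Python) =====
-- SEPARATORS = [" ", "\n", "\r", "{", "}", "=", ">",
--               "<", ":", "?", ",", "\"", "\'", "(", ")"]
--
-- def get_next_word_indices(data):
--     """Get indices between separators,
--     skipping separators at start"""
--     # Normalize every separator to one canonical separator, split on it,
--     # and locate the first non-empty piece by a running offset.
--     norm = "".join(" " if c in SEPARATORS else c for c in data)
--     pos = 0
--     for part in norm.split(" "):
--         if part:
--             end = pos + len(part)
--             return (pos, end) if end < len(data) else (None, None)
--         pos += len(part) + 1
--     return (None, None)  # only separators: no word at all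
-- ===== Notes on version B (the rewrite author's own statement) =====
-- stated objective: alternative
-- what changed: Instead of A's single stateful character scan, B normalizes every separator to one canonical separator character, splits the string into parts on it, and locates the first non-empty part with a running offset (prefix-sum of part lengths), checking whether a separator follows by comparing the word's end against the total length.
import Mathlib
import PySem

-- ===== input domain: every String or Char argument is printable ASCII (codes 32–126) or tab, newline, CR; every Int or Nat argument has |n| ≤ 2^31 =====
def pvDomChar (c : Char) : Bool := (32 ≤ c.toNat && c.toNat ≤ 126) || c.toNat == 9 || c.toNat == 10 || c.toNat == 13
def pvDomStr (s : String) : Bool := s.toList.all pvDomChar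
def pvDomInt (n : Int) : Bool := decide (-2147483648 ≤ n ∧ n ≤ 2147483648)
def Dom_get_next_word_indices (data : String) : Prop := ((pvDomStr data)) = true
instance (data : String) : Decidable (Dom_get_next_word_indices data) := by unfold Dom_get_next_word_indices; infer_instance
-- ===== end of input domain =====

-- B replaces A's single stateful character scan by normalize-separators, split on the
-- canonical separator, walk the parts with a running offset — an alternative decomposition, same O(n).

-- ===== PORT A =====
def pvIsSep (c : Char) : Bool :=
  c ∈ [' ', '\n', '\r', '{', '}', '=', '>', '<', ':', '?', ',', '\"', '\'', '(', ')']

-- A's loop: for i in range(len(data)) with state `start : Option Int`, both ifs in order.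
def pvLoopA : List Char → Int → Option Int → Option Int × Option Int
  | [], _, _ => (none, none)
  | c :: rest, i, start =>
    let start' := if start = none ∧ ¬ pvIsSep c then some i else start
    if start' ≠ none ∧ pvIsSep c then (start', some i)
    else pvLoopA rest (i + 1) start'

def get_next_word_indices (data : String) : Option Int × Option Int :=
  pvLoopA data.toList 0 none

-- ===== PORT B =====
-- "".join(" " if c in SEPARATORS else c for c in data): per-character map
def pvNorm (cs : List Char) : List Char :=
  cs.map (fun c => if pvIsSep c then ' ' else c)

-- Source B's for-loop over norm.split(" ") with the running offset `pos`; n = len(data)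
def pvLoopB : List (List Char) → Int → Int → Option Int × Option Int
  | [], _, _ => (none, none)
  | part :: parts, pos, n =>
    if part ≠ [] then
      (if pos + part.length < n then (some pos, some (pos + part.length)) else (none, none))
    else pvLoopB parts (pos + part.length + 1) n

def get_next_word_indices_alt (data : String) : Option Int × Option Int :=
  let cs := data.toList
  pvLoopB (PySem.Chars.splitOn (pvNorm cs) [' ']) 0 cs.length

-- ===== PRECONDITION & SPEC =====
def Spec_get_next_word_indices (data : String) (out : Option Int × Option Int) : Prop := out = get_next_word_indices_alt data
instance (data : String) (out : Option Int × Option Int) : Decidable (Spec_get_next_word_indices data out) := by unfold Spec_get_next_word_indices; infer_instance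

-- ===== CLAIM (what is proved, stated in full; the proofs are below) =====
def Claim_equal_get_next_word_indices : Prop := ∀ (data : String), Dom_get_next_word_indices data → Spec_get_next_word_indices data (get_next_word_indices data)

-- ===== LEMMAS AND PROOFS =====

-- helpers used only by the proofs: index of first non-separator / first separator
def pvFindStart : List Char → Int → Option Int
  | [], _ => none
  | c :: rest, i => if ¬ pvIsSep c then some i else pvFindStart rest (i + 1)

def pvFindSep : List Char → Int → Option Int
  | [], _ => none
  | c :: rest, j => if pvIsSep c then some j else pvFindSep rest (j + 1)

-- the common reference value both programs compute
def pvRef (cs : List Char) (i : Int) : Option Int × Option Int :=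
  match pvFindStart cs i with
  | none => (none, none)
  | some s =>
    match pvFindSep (cs.drop (s + 1 - i).toNat) (s + 1) with
    | none => (none, none)
    | some j => (some s, some j)

lemma pvFindStart_ge : ∀ (cs : List Char) (i s : Int), pvFindStart cs i = some s → i ≤ s := by
  intro cs
  induction cs with
  | nil => intro i s h; simp [pvFindStart] at h
  | cons c rest ih =>
    intro i s h
    simp only [pvFindStart] at h
    split at h
    · simp at h; omega
    · have := ih (i + 1) s h; omega

lemma pvLoopA_some : ∀ (cs : List Char) (i s : Int),
    pvLoopA cs i (some s) =
      (match pvFindSep cs i with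
       | none => (none, none)
       | some j => (some s, some j)) := by
  intro cs
  induction cs with
  | nil => intro i s; simp [pvLoopA, pvFindSep]
  | cons c rest ih =>
    intro i s
    by_cases h : pvIsSep c = true <;> simp [pvLoopA, pvFindSep, h, ih]

lemma pvLoopA_none : ∀ (cs : List Char) (i : Int), 0 ≤ i →
    pvLoopA cs i none = pvRef cs i := by
  intro cs
  induction cs with
  | nil => intro i _; simp [pvLoopA, pvFindStart, pvRef]
  | cons c rest ih =>
    intro i hi
    by_cases h : pvIsSep c = true
    · have hrec := ih (i + 1) (by omega)
      cases hfs : pvFindStart rest (i + 1) with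
      | none => simp [pvLoopA, pvRef, pvFindStart, h, hrec, hfs]
      | some s =>
        have hs := pvFindStart_ge rest (i + 1) s hfs
        have hdrop : (c :: rest).drop (s + 1 - i).toNat = rest.drop (s + 1 - (i + 1)).toNat := by
          have h1 : (s + 1 - i).toNat = (s + 1 - (i + 1)).toNat + 1 := by omega
          rw [h1]; rfl
        simp [pvLoopA, pvRef, pvFindStart, h, hrec, hfs, hdrop]
    · simp [pvLoopA, pvRef, pvFindStart, pvLoopA_some, h]


lemma pvModifyHead_id {α : Type} (l : List α) : l.modifyHead (fun x => x) = l := by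
  cases l <;> rfl

lemma pvNorm_beq_space (c : Char) (h : pvIsSep c = false) :
    ((if pvIsSep c then ' ' else c) == ' ') = false := by
  have hc : c ≠ ' ' := by intro hcc; subst hcc; simp [pvIsSep] at h
  simp [h, hc]

lemma pvSplit_cons_sep (c : Char) (rest : List Char) (h : pvIsSep c = true) :
    (pvNorm (c :: rest)).splitOnP (· == ' ') = [] :: (pvNorm rest).splitOnP (· == ' ') := by
  simp [pvNorm, List.splitOnP_cons, h]

lemma pvSplit_cons_nonsep (c : Char) (rest : List Char) (p : List Char) (ps : List (List Char))
    (h : pvIsSep c = false) (hne : (pvNorm rest).splitOnP (· == ' ') = p :: ps) :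
    (pvNorm (c :: rest)).splitOnP (· == ' ') = (c :: p) :: ps := by
  simp only [pvNorm, List.map_cons, List.splitOnP_cons]
  rw [pvNorm_beq_space c h]
  simp only [Bool.false_eq_true, if_false]
  rw [show List.splitOnP (fun x => x == ' ') (List.map (fun c => if pvIsSep c = true then ' ' else c) rest) = p :: ps from hne]
  simp [h]

-- PySem's fuelled splitOn on a one-char separator is Mathlib's splitOnP
lemma pvSplitOn_go_eq : ∀ (fuel : Nat) (l cur : List Char) (acc : List (List Char)),
    l.length < fuel →
    PySem.Chars.splitOn.go [' '] fuel l cur acc =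
      acc.reverse ++ (l.splitOnP (· == ' ')).modifyHead (cur.reverse ++ ·) := by
  intro fuel
  induction fuel with
  | zero => intro l cur acc h; omega
  | succ fuel ih =>
    intro l cur acc h
    cases l with
    | nil => simp [PySem.Chars.splitOn.go, List.splitOnP_nil]
    | cons c rest =>
      by_cases hc : c = ' '
      · subst hc
        rw [show PySem.Chars.splitOn.go [' '] (fuel + 1) (' ' :: rest) cur acc
              = PySem.Chars.splitOn.go [' '] fuel rest [] (cur.reverse :: acc) from by
            simp [PySem.Chars.splitOn.go, List.isPrefixOf]]
        rw [ih rest [] (cur.reverse :: acc) (by simpa using h)]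
        simp [List.splitOnP_cons, pvModifyHead_id]
      · rw [show PySem.Chars.splitOn.go [' '] (fuel + 1) (c :: rest) cur acc
              = PySem.Chars.splitOn.go [' '] fuel rest (c :: cur) acc from by
            simp only [PySem.Chars.splitOn.go, List.isPrefixOf, List.length_cons]
            rw [show (' ' == c) = false from by simp [Ne.symm hc]]
            rfl]
        rw [ih rest (c :: cur) acc (by simpa using h)]
        rw [show List.splitOnP (fun x => x == ' ') (c :: rest)
              = (List.splitOnP (fun x => x == ' ') rest).modifyHead (List.cons c) from by
            simp only [List.splitOnP_cons]
            rw [show (c == ' ') = false from by simp [hc]]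
            rfl]
        rcases hne : rest.splitOnP (· == ' ') with _ | ⟨p, ps⟩
        · exact absurd hne (List.splitOnP_ne_nil _ _)
        · simp

lemma pvSplitOn_eq (l : List Char) :
    PySem.Chars.splitOn l [' '] = l.splitOnP (· == ' ') := by
  show PySem.Chars.splitOn.go [' '] (l.length + 1) l [] [] = _
  rw [pvSplitOn_go_eq (l.length + 1) l [] [] (by omega)]
  simp [pvModifyHead_id]

-- head of the split of the normalized tail measures the word's length;
-- pvFindSep is none iff the word runs to the end, else points right after it
lemma pvHead_split_norm : ∀ (rest : List Char) (j : Int),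
    ((pvNorm rest).splitOnP (· == ' ')).headI.length ≤ rest.length ∧
    pvFindSep rest j =
      (if ((pvNorm rest).splitOnP (· == ' ')).headI.length = rest.length then none
       else some (j + ((pvNorm rest).splitOnP (· == ' ')).headI.length)) := by
  intro rest
  induction rest with
  | nil => intro j; simp [pvNorm, pvFindSep, List.splitOnP_nil]
  | cons c rest ih =>
    intro j
    by_cases h : pvIsSep c = true
    · rw [pvSplit_cons_sep c rest h]
      constructor
      · simp
      · simp [pvFindSep, h]
    · have h' : pvIsSep c = false := by simpa using h
      have hih := ih (j + 1)
      rcases hne : (pvNorm rest).splitOnP (· == ' ') with _ | ⟨p, ps⟩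
      · exact absurd hne (List.splitOnP_ne_nil _ _)
      · rw [hne] at hih
        simp only [List.headI] at hih
        rw [pvSplit_cons_nonsep c rest p ps h' hne]
        simp only [List.headI, List.length_cons, pvFindSep, h', Bool.false_eq_true, if_false]
        constructor
        · omega
        · rw [hih.2]
          split_ifs with h1 h2 h2
          · rfl
          · omega
          · omega
          · congr 1; omega

-- the B-side loop over parts computes the same reference value
lemma pvLoopB_eq : ∀ (cs : List Char) (pos : Int), 0 ≤ pos →
    pvLoopB ((pvNorm cs).splitOnP (· == ' ')) pos (pos + cs.length) = pvRef cs pos := by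
  intro cs
  induction cs with
  | nil => intro pos _; simp [pvNorm, List.splitOnP_nil, pvLoopB, pvRef, pvFindStart]
  | cons c rest ih =>
    intro pos hpos
    by_cases h : pvIsSep c = true
    · -- empty first part: skip one separator
      have hrec := ih (pos + 1) (by omega)
      have hn : pos + ((c :: rest).length : Int) = (pos + 1) + rest.length := by
        simp; omega
      rw [pvSplit_cons_sep c rest h]
      rw [show pvLoopB ([] :: (pvNorm rest).splitOnP (· == ' ')) pos (pos + ((c :: rest).length : Int))
            = pvLoopB ((pvNorm rest).splitOnP (· == ' ')) (pos + 1) ((pos + 1) + rest.length) from by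
        rw [hn]; simp [pvLoopB]]
      rw [hrec]
      -- pvRef (c :: rest) pos = pvRef rest (pos + 1) when c is a separator
      cases hfs : pvFindStart rest (pos + 1) with
      | none => simp [pvRef, pvFindStart, h, hfs]
      | some s =>
        have hs := pvFindStart_ge rest (pos + 1) s hfs
        have hdrop : (c :: rest).drop (s + 1 - pos).toNat = rest.drop (s + 1 - (pos + 1)).toNat := by
          have h1 : (s + 1 - pos).toNat = (s + 1 - (pos + 1)).toNat + 1 := by omega
          rw [h1]; rfl
        simp [pvRef, pvFindStart, h, hfs, hdrop]
    · -- nonempty first part: the word starts at pos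
      have h' : pvIsSep c = false := by simpa using h
      rcases hne : (pvNorm rest).splitOnP (· == ' ') with _ | ⟨p, ps⟩
      · exact absurd hne (List.splitOnP_ne_nil _ _)
      · have hsplit := pvSplit_cons_nonsep c rest p ps h' hne
        have hhead := pvHead_split_norm rest (pos + 1)
        rw [hne] at hhead
        simp only [List.headI] at hhead
        obtain ⟨hple, hfs⟩ := hhead
        rw [hsplit]
        simp only [pvLoopB, List.length_cons]
        rw [if_pos (by simp)]
        have hstart : pvFindStart (c :: rest) pos = some pos := by
          simp [pvFindStart, h]
        have hdrop1 : (c :: rest).drop (pos + 1 - pos).toNat = rest := by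
          have : (pos + 1 - pos).toNat = 1 := by omega
          rw [this]; rfl
        simp only [pvRef, hstart, hdrop1, hfs]
        split_ifs with h1 h2 h2
        · exfalso; omega
        · simp; omega
        · rfl
        · exfalso; omega

-- ===== VERDICT (by name: the statement is the Claim_ definition above) =====
theorem get_next_word_indices_spec : Claim_equal_get_next_word_indices := by
  intro data _
  unfold Spec_get_next_word_indices get_next_word_indices get_next_word_indices_alt
  rw [pvLoopA_none data.toList 0 le_rfl]
  show pvRef data.toList 0
      = pvLoopB (PySem.Chars.splitOn (pvNorm data.toList) [' ']) 0 (data.toList.length : Int)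
  rw [pvSplitOn_eq]
  rw [show ((data.toList.length : Int)) = 0 + (data.toList.length : Int) from by omega]
  exact (pvLoopB_eq data.toList 0 le_rfl).symm
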